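-- pv_equiv track=rewrite | github.com/memphis95/Algorithms | cses/Introductory Problem/9_bit_strings.py | calculate_bit_strings
-- ===== SOURCE A (Python) =====
-- def calculate_bit_strings(n):
--     MOD = 1000000007
--     """
--     The below approach works as
--     """
--     answer = 1
--     for i in range(1, n+1):
--         answer *= 2
--         answer %= MOD
--     return answer
-- ===== SOURCE B (Python) =====
-- def calculate_bit_strings(n):
--     MOD = 1000000007
--     if n <= 0:
--         return 1
--     half = calculate_bit_strings(n // 2)
--     result = half * half % MOD
--     if n % 2 == 1:
--         result = result * 2 % MOD
--     return result
-- ===== Notes on version B (the rewrite author's own statement) =====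
-- stated objective: faster
-- what changed: Replaced the O(n) doubling loop by recursive binary exponentiation (square-and-multiply), computing 2^n mod 1e9+7 in O(log n) multiplications.
import Mathlib
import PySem

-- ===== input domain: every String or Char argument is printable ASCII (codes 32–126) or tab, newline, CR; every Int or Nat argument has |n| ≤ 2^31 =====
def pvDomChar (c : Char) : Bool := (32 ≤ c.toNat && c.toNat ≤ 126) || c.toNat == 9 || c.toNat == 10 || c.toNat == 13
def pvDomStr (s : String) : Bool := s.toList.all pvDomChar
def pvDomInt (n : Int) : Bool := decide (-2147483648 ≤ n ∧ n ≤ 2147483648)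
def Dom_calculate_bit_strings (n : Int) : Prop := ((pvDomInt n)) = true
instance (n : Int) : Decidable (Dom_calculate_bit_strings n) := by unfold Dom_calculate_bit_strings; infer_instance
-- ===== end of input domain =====

-- B replaces A's O(n) doubling loop by recursive binary exponentiation (O(log n) multiplications); same result 2^n mod 1e9+7.

-- ===== PORT A =====
def calculate_bit_strings (n : Int) : Int :=
  (PySem.List.pyRange 1 (n + 1) 1).foldl
    (fun answer _ => answer * 2 % 1000000007) 1

-- ===== PORT B =====
-- termination: n // 2 strictly decreases n.toNat when 0 < n
theorem pvHalfLt (n : Int) (h : ¬ n ≤ 0) :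
    (PySem.Int.floordiv n 2).toNat < n.toNat := by
  rw [PySem.Int.floordiv_eq_ediv_of_pos (by omega : (0:Int) < 2)]
  omega

def calculate_bit_strings_alt (n : Int) : Int :=
  if h : n ≤ 0 then 1
  else
    let half := calculate_bit_strings_alt (PySem.Int.floordiv n 2)
    let result := half * half % 1000000007
    if PySem.Int.mod n 2 = 1 then result * 2 % 1000000007 else result
termination_by n.toNat
decreasing_by exact pvHalfLt n h

-- ===== PRECONDITION & SPEC =====
def Spec_calculate_bit_strings (n : Int) (out : Int) : Prop := out = calculate_bit_strings_alt n
instance (n : Int) (out : Int) : Decidable (Spec_calculate_bit_strings n out) := by unfold Spec_calculate_bit_strings; infer_instance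

-- ===== CLAIM (what is proved, stated in full; the proofs are below) =====
def Claim_equal_calculate_bit_strings : Prop := ∀ (n : Int), Dom_calculate_bit_strings n → Spec_calculate_bit_strings n (calculate_bit_strings n)

-- ===== LEMMAS AND PROOFS =====

-- A's fold over any list of length k computes (a * 2^k) % MOD (starting from a % MOD)
theorem pvFoldA (l : List Int) (a : Int) :
    l.foldl (fun answer _ => answer * 2 % 1000000007) (a % 1000000007)
      = a * 2 ^ l.length % 1000000007 := by
  induction l generalizing a with
  | nil => simp
  | cons x t ih =>
      simp only [List.foldl_cons, List.length_cons]
      have h2 : a % 1000000007 * 2 % 1000000007 = a * 2 % 1000000007 := by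
        rw [Int.mul_emod a 2 1000000007]; norm_num
      rw [h2, ih (a * 2)]
      rw [pow_succ]; ring_nf

theorem pvA_closed (n : Int) :
    calculate_bit_strings n = 2 ^ n.toNat % 1000000007 := by
  unfold calculate_bit_strings
  have h := pvFoldA (PySem.List.pyRange 1 (n + 1) 1) 1
  rw [PySem.List.length_pyRange_one] at h
  have e1 : (1 : Int) % 1000000007 = 1 := by decide
  have e2 : (n + 1 - 1).toNat = n.toNat := by omega
  rw [e1, e2, one_mul] at h
  exact h

theorem pvSq (k : Nat) : (2:Int) ^ k % 1000000007 * ((2:Int) ^ k % 1000000007) % 1000000007 = (2:Int) ^ (k + k) % 1000000007 := by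
  conv_lhs => rw [← Int.mul_emod]
  rw [← pow_add]

theorem pvDouble (a : Int) : a % 1000000007 * 2 % 1000000007 = a * 2 % 1000000007 := by
  rw [Int.mul_emod a 2 1000000007]; norm_num

theorem pvB_closed (n : Int) :
    calculate_bit_strings_alt n = 2 ^ n.toNat % 1000000007 := by
  rw [calculate_bit_strings_alt]
  by_cases h : n ≤ 0
  · have h0 : n.toNat = 0 := by omega
    simp [h, h0]
  · have ih := pvB_closed (PySem.Int.floordiv n 2)
    have hfd : PySem.Int.floordiv n 2 = n / 2 :=
      PySem.Int.floordiv_eq_ediv_of_pos (by omega)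
    have hmd : PySem.Int.mod n 2 = n % 2 :=
      PySem.Int.mod_eq_emod_of_pos (by omega)
    have htn : (PySem.Int.floordiv n 2).toNat = n.toNat / 2 := by
      rw [hfd]; omega
    rw [htn] at ih
    simp only [h, dif_neg, not_false_iff, ih, hmd]
    rw [pvSq (n.toNat / 2)]
    by_cases hodd : n % 2 = 1
    · have hm : n.toNat / 2 + n.toNat / 2 + 1 = n.toNat := by omega
      simp only [hodd, if_true]
      rw [pvDouble, ← pow_succ, hm]
    · have hm : n.toNat / 2 + n.toNat / 2 = n.toNat := by omega
      simp only [hodd, if_false, hm]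
termination_by n.toNat
decreasing_by exact pvHalfLt n h

-- ===== VERDICT (by name: the statement is the Claim_ definition above) =====
theorem calculate_bit_strings_spec : Claim_equal_calculate_bit_strings := by
  intro n _
  unfold Spec_calculate_bit_strings
  rw [pvA_closed, pvB_closed]
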